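-- pv_equiv track=rewrite | github.com/woong02022/sheet_to_midi | shape.py | multi_make_2
-- ===== SOURCE A (Python) =====
-- def multi_make_2(add_finger_1, add_finger_2, count, made_finger):
--     """
--     주어진 2개의 멀티 핑거 (add_finger_1, add_finger_2) 를
--     얼마나 반복시킬지, 어떻게 반복시킬지 정한다.
--     """
--     # 짝수 라면
--     if count % 2 == 0:
--         for i in range(0, count):
--             made_finger += add_finger_1
--             made_finger += add_finger_2
--
--     # 홀수 라면
--     else:
--         for i in range(0, count - 1):
--             made_finger += add_finger_1
--             made_finger += add_finger_2
--     made_finger += add_finger_2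
--
--     return made_finger
-- ===== SOURCE B (Python) =====
-- def multi_make_2(add_finger_1, add_finger_2, count, made_finger):
--     # even repeat count: drop the odd remainder, then one closed-form extend
--     n = count - count % 2
--     made_finger += (add_finger_1 + add_finger_2) * n + add_finger_2
--     return made_finger
-- ===== Notes on version B (the rewrite author's own statement) =====
-- stated objective: simpler
-- what changed: Replaces the even/odd branch with two explicit loops by one closed-form list multiplication: n = count - count % 2 and a single extend with (add_finger_1 + add_finger_2) * n + add_finger_2.
import Mathlib
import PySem

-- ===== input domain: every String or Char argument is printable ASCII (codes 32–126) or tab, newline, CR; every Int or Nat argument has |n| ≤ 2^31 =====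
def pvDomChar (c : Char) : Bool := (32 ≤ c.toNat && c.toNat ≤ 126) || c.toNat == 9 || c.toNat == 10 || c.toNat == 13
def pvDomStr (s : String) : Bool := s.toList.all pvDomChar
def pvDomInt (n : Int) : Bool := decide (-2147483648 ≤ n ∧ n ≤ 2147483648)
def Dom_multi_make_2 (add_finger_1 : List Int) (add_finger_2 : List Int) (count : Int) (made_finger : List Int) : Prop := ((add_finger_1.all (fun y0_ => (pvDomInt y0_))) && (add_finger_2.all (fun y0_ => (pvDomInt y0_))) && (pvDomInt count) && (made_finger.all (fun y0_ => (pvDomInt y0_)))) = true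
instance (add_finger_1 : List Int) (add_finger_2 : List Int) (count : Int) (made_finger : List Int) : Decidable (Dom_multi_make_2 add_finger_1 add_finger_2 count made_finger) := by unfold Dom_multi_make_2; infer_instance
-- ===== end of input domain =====

-- B replaces the even/odd loops by one closed-form extend (count - count%2 repetitions); objective: simpler.
-- ===== PORT A =====
def multi_make_2 (add_finger_1 : List Int) (add_finger_2 : List Int) (count : Int) (made_finger : List Int) : List Int :=
  if PySem.Int.mod count 2 = 0 then
    let made_finger := (PySem.List.pyRange 0 count 1).foldl
      (fun acc _ => (acc ++ add_finger_1) ++ add_finger_2) made_finger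
    made_finger ++ add_finger_2
  else
    let made_finger := (PySem.List.pyRange 0 (count - 1) 1).foldl
      (fun acc _ => (acc ++ add_finger_1) ++ add_finger_2) made_finger
    made_finger ++ add_finger_2

-- ===== PORT B =====
def multi_make_2_alt (add_finger_1 : List Int) (add_finger_2 : List Int) (count : Int) (made_finger : List Int) : List Int :=
  let n := count - PySem.Int.mod count 2
  made_finger ++ ((List.replicate n.toNat (add_finger_1 ++ add_finger_2)).flatten ++ add_finger_2)

-- ===== PRECONDITION & SPEC =====
def Spec_multi_make_2 (add_finger_1 : List Int) (add_finger_2 : List Int) (count : Int) (made_finger : List Int) (out : List Int) : Prop := out = multi_make_2_alt add_finger_1 add_finger_2 count made_finger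
instance (add_finger_1 : List Int) (add_finger_2 : List Int) (count : Int) (made_finger : List Int) (out : List Int) : Decidable (Spec_multi_make_2 add_finger_1 add_finger_2 count made_finger out) := by unfold Spec_multi_make_2; infer_instance

-- ===== CLAIM (what is proved, stated in full; the proofs are below) =====
def Claim_equal_multi_make_2 : Prop := ∀ (add_finger_1 : List Int) (add_finger_2 : List Int) (count : Int) (made_finger : List Int), Dom_multi_make_2 add_finger_1 add_finger_2 count made_finger → Spec_multi_make_2 add_finger_1 add_finger_2 count made_finger (multi_make_2 add_finger_1 add_finger_2 count made_finger)

-- ===== LEMMAS AND PROOFS =====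

-- ===== VERDICT (by name: the statement is the Claim_ definition above) =====
-- the constant-body foldl appends (a1 ++ a2) once per list element
theorem foldl_const_append (a1 a2 : List Int) :
    ∀ (l : List Int) (acc : List Int),
      l.foldl (fun acc _ => (acc ++ a1) ++ a2) acc
        = acc ++ (List.replicate l.length (a1 ++ a2)).flatten := by
  intro l
  induction l with
  | nil => intro acc; simp
  | cons x xs ih =>
    intro acc
    simp [List.foldl_cons, ih, List.replicate_succ, List.flatten_cons]

theorem multi_make_2_spec : Claim_equal_multi_make_2 := by
  intro a1 a2 count made _
  unfold Spec_multi_make_2 multi_make_2 multi_make_2_alt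
  by_cases h : PySem.Int.mod count 2 = 0
  · simp only [h, if_pos]
    rw [foldl_const_append, PySem.List.length_pyRange_one]
    simp
  · have h1 : PySem.Int.mod count 2 = 1 := by
      rcases PySem.Int.mod_two_eq count with h0 | h0
      · exact absurd h0 h
      · exact h0
    simp only [h, if_neg, not_false_iff]
    rw [foldl_const_append, PySem.List.length_pyRange_one, h1]
    simp
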